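-- pv_equiv track=rewrite | github.com/AlinaOs/Doernenkrantz_TRD | trd/evaluation.py | identicalMatches
-- ===== SOURCE A (Python) =====
-- def identicalMatches(match1: list[tuple[str, int, int]], match2: list[tuple[str, int, int]]) -> bool:
--     """
--     Match needs to be a list containing triples, each triple indicating an identifier for the text, the start index and
--     end index of the match. The matches are seen as identical, if at least two pairs of triplets can be found, such that
--     the pair's triplets belong to a different match respectively and each pair belongs to a different text, but the
--     triplets in each pair still belong to the same text and their indices overlap.
--
--     :param match1: A list of matching passages in triple.
--     :param match2: A list of matching passages in triple.
--     :return: True, if both matches denote the same passage. False otherwise.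
--     """
--
--     matchingpairs = dict()
--     for m1 in match1:
--         docid = m1[0]
--         for m2 in match2:
--             if m2[0] == docid and (
--                     (m1[1] <= m2[1] <= m1[2])
--                     or
--                     (m1[1] <= m2[2] <= m1[2])
--                     or
--                     (m2[1] <= m1[1] <= m2[2])
--                     or
--                     (m2[1] <= m1[2] <= m2[2])):
--                 mplist = matchingpairs.get(docid, [])
--                 mplist.append((m1, m2))
--                 matchingpairs[docid] = mplist
--
--     if len(matchingpairs.keys()) > 1:
--         return True
--
--     return False
-- ===== SOURCE B (Python) =====
-- def identicalMatches(match1: list[tuple[str, int, int]], match2: list[tuple[str, int, int]]) -> bool: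
--     # Index match2 by docid once, then a single pass over match1, early-exiting
--     # as soon as overlapping passages are found in two distinct texts.
--     index = {}
--     for d, s, e in match2:
--         index.setdefault(d, []).append((s, e))
--     first = None
--     for d, s, e in match1:
--         if any(s <= b <= e or s <= c <= e or b <= s <= c or b <= e <= c
--                for b, c in index.get(d, [])):
--             if first is None:
--                 first = d
--             elif d != first:
--                 return True
--     return False
-- ===== Notes on version B (the rewrite author's own statement) =====
-- stated objective: faster
-- what changed: B replaces A's full n*m cross-product of comparisons and its dict of collected pairs by a one-pass per-docid index of match2 plus a single early-exiting pass over match1 that tracks only the first hit docid and returns True at the second distinct one.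
import Mathlib
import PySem

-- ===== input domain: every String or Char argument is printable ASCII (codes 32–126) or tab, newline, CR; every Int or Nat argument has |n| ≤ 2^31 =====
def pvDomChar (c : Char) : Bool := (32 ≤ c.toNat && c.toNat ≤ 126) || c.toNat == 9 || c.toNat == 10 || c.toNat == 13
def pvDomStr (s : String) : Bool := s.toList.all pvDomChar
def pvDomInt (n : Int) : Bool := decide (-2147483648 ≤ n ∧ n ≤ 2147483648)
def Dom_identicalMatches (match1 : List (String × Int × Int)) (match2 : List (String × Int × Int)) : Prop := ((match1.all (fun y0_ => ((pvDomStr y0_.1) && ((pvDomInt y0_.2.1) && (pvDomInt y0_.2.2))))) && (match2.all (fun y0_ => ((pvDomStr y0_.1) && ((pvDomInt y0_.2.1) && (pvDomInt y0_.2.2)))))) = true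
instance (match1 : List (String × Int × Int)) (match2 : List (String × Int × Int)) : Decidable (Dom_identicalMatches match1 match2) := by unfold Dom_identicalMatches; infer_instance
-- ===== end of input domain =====

-- B builds a per-docid index of match2 once and makes one early-exiting pass over
-- match1, instead of A's full cross-product collecting all overlapping pairs (objective: faster).

-- ===== PORT A =====
-- the overlap test shared by both Pythons, written once (both sources contain it verbatim)
def pvOverlaps (a : Int × Int) (b : Int × Int) : Bool :=
  (decide (a.1 ≤ b.1) && decide (b.1 ≤ a.2)) ||
  (decide (a.1 ≤ b.2) && decide (b.2 ≤ a.2)) ||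
  (decide (b.1 ≤ a.1) && decide (a.1 ≤ b.2)) ||
  (decide (b.1 ≤ a.2) && decide (a.2 ≤ b.2))

def identicalMatches (match1 : List (String × Int × Int)) (match2 : List (String × Int × Int)) : Bool :=
  let matchingpairs : PySem.Dict String (List ((String × Int × Int) × (String × Int × Int))) :=
    match1.foldl (fun mp m1 =>
      match2.foldl (fun mp m2 =>
        if m2.1 == m1.1 && pvOverlaps m1.2 m2.2 then
          mp.insert m1.1 (mp.getD m1.1 [] ++ [(m1, m2)])
        else mp) mp) PySem.Dict.empty
  decide (1 < matchingpairs.keys.length)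

-- ===== PORT B =====
def pvIndex (match2 : List (String × Int × Int)) : PySem.Dict String (List (Int × Int)) :=
  match2.foldl (fun d p => d.modify p.1 [] (· ++ [p.2])) PySem.Dict.empty

def pvHit (idx : PySem.Dict String (List (Int × Int))) (m : String × Int × Int) : Bool :=
  (idx.getD m.1 []).any (fun bc => pvOverlaps m.2 bc)

def pvLoop (idx : PySem.Dict String (List (Int × Int))) :
    List (String × Int × Int) → Option String → Bool
  | [], _ => false
  | m :: rest, first =>
    if pvHit idx m then
      match first with
      | none => pvLoop idx rest (some m.1)
      | some f => if m.1 == f then pvLoop idx rest (some f) else true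
    else pvLoop idx rest first

def identicalMatches_alt (match1 : List (String × Int × Int)) (match2 : List (String × Int × Int)) : Bool :=
  pvLoop (pvIndex match2) match1 none

-- ===== PRECONDITION & SPEC =====
def Spec_identicalMatches (match1 : List (String × Int × Int)) (match2 : List (String × Int × Int)) (out : Bool) : Prop := out = identicalMatches_alt match1 match2
instance (match1 : List (String × Int × Int)) (match2 : List (String × Int × Int)) (out : Bool) : Decidable (Spec_identicalMatches match1 match2 out) := by unfold Spec_identicalMatches; infer_instance

-- ===== CLAIM (what is proved, stated in full; the proofs are below) =====
def Claim_equal_identicalMatches : Prop := ∀ (match1 : List (String × Int × Int)) (match2 : List (String × Int × Int)), Dom_identicalMatches match1 match2 → Spec_identicalMatches match1 match2 (identicalMatches match1 match2)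

-- ===== LEMMAS AND PROOFS =====

-- 'm overlaps some passage of match2 in the same text' — the fact both programs test
def pvHitP (match2 : List (String × Int × Int)) (m : String × Int × Int) : Bool :=
  match2.any (fun m2 => m2.1 == m.1 && pvOverlaps m.2 m2.2)

-- the common spec: match1 has hits in two distinct texts
def pvTwoHits (match1 match2 : List (String × Int × Int)) : Bool :=
  match1.any (fun m => match1.any (fun m' =>
    pvHitP match2 m && pvHitP match2 m' && m.1 != m'.1))

lemma pvTwoHits_iff (match1 match2 : List (String × Int × Int)) :
    pvTwoHits match1 match2 = true ↔
      ∃ m ∈ match1, ∃ m' ∈ match1,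
        pvHitP match2 m = true ∧ pvHitP match2 m' = true ∧ m.1 ≠ m'.1 := by
  unfold pvTwoHits
  simp only [List.any_eq_true, Bool.and_eq_true, bne_iff_ne]
  constructor
  · rintro ⟨m, hm, m', hm', ⟨h1, h2⟩, h3⟩
    exact ⟨m, hm, m', hm', h1, h2, h3⟩
  · rintro ⟨m, hm, m', hm', h1, h2, h3⟩
    exact ⟨m, hm, m', hm', ⟨h1, h2⟩, h3⟩

-- B's bucket lookup computes exactly the hit test
lemma pvHit_index (match2 : List (String × Int × Int)) (m : String × Int × Int) :
    pvHit (pvIndex match2) m = pvHitP match2 m := by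
  unfold pvHit pvIndex pvHitP
  rw [PySem.Dict.getD_foldl_modify_append]
  simp [List.any_filter, List.any_map, PySem.Dict.getD_empty]

-- A's inner loop: keys gain m1.1 iff some m2 hits, and only if not already there
lemma keys_innerA (m1 : String × Int × Int)
    (m2s : List (String × Int × Int))
    (mp : PySem.Dict String (List ((String × Int × Int) × (String × Int × Int)))) :
    (m2s.foldl (fun mp m2 =>
        if m2.1 == m1.1 && pvOverlaps m1.2 m2.2 then
          mp.insert m1.1 (mp.getD m1.1 [] ++ [(m1, m2)])
        else mp) mp).keys
      = if m2s.any (fun m2 => m2.1 == m1.1 && pvOverlaps m1.2 m2.2) && !mp.contains m1.1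
        then mp.keys ++ [m1.1] else mp.keys := by
  induction m2s generalizing mp with
  | nil => simp
  | cons h t ih =>
    simp only [List.foldl_cons]
    by_cases hp : (h.1 == m1.1 && pvOverlaps m1.2 h.2) = true
    · rw [if_pos hp, ih]
      have hany : ((h :: t).any fun m2 => m2.1 == m1.1 && pvOverlaps m1.2 m2.2) = true := by
        simp only [List.any_cons, hp, Bool.true_or]
      rw [hany]
      by_cases hc : mp.contains m1.1 = true
      · rw [PySem.Dict.keys_insert_of_contains _ _ hc]
        simp [hc, PySem.Dict.contains_insert_self]
      · rw [PySem.Dict.keys_insert_of_not_contains _ _ (by simpa using hc)]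
        simp [hc, PySem.Dict.contains_insert_self]
    · rw [if_neg hp, ih]
      have hp' : (h.1 == m1.1 && pvOverlaps m1.2 h.2) = false := Bool.eq_false_iff.mpr hp
      have hany : ((h :: t).any fun m2 => m2.1 == m1.1 && pvOverlaps m1.2 m2.2)
          = (t.any fun m2 => m2.1 == m1.1 && pvOverlaps m1.2 m2.2) := by
        simp only [List.any_cons, hp', Bool.false_or]
      rw [hany]

-- A's outer loop, membership of the key list
lemma mem_keys_outerA (match2 : List (String × Int × Int))
    (m1s : List (String × Int × Int))
    (mp : PySem.Dict String (List ((String × Int × Int) × (String × Int × Int))))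
    (k : String) :
    (k ∈ (m1s.foldl (fun mp m1 =>
        match2.foldl (fun mp m2 =>
          if m2.1 == m1.1 && pvOverlaps m1.2 m2.2 then
            mp.insert m1.1 (mp.getD m1.1 [] ++ [(m1, m2)])
          else mp) mp) mp).keys)
      ↔ (k ∈ mp.keys ∨ ∃ m ∈ m1s, m.1 = k ∧ pvHitP match2 m = true) := by
  induction m1s generalizing mp with
  | nil => simp
  | cons h t ih =>
    simp only [List.foldl_cons]
    rw [ih, keys_innerA]
    have hh : (match2.any (fun m2 => m2.1 == h.1 && pvOverlaps h.2 m2.2)) = pvHitP match2 h := rfl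
    split_ifs with hcond
    · rw [Bool.and_eq_true, Bool.not_eq_true'] at hcond
      rw [hh] at hcond
      simp only [List.mem_append, List.mem_cons]
      constructor
      · rintro ((hk | hk) | ⟨m, hm, hmk, hhit⟩)
        · exact Or.inl hk
        · rcases hk with hk | hk
          · exact Or.inr ⟨h, Or.inl rfl, hk.symm, hcond.1⟩
          · cases hk
        · exact Or.inr ⟨m, Or.inr hm, hmk, hhit⟩
      · rintro (hk | ⟨m, hm, hmk, hhit⟩)
        · exact Or.inl (Or.inl hk)
        · rcases hm with rfl | hm
          · exact Or.inl (Or.inr (Or.inl hmk.symm))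
          · exact Or.inr ⟨m, hm, hmk, hhit⟩
    · rw [Bool.and_eq_true, Bool.not_eq_true'] at hcond
      rw [hh] at hcond
      simp only [List.mem_cons]
      constructor
      · rintro (hk | ⟨m, hm, hmk, hhit⟩)
        · exact Or.inl hk
        · exact Or.inr ⟨m, Or.inr hm, hmk, hhit⟩
      · rintro (hk | ⟨m, hm, hmk, hhit⟩)
        · exact Or.inl hk
        · rcases hm with rfl | hm
          · -- m = h hits, so by hcond mp already contains h.1 = k
            have hc : mp.contains m.1 = true := by
              by_cases hb : mp.contains m.1 = true
              · exact hb
              · exact absurd ⟨hhit, Bool.eq_false_iff.mpr hb⟩ hcond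
            exact Or.inl (hmk ▸ (PySem.Dict.contains_iff_mem_keys mp m.1).mp hc)
          · exact Or.inr ⟨m, hm, hmk, hhit⟩

-- A's outer loop preserves key uniqueness
lemma nodup_keys_outerA (match2 : List (String × Int × Int))
    (m1s : List (String × Int × Int))
    (mp : PySem.Dict String (List ((String × Int × Int) × (String × Int × Int))))
    (hnd : mp.keys.Nodup) :
    (m1s.foldl (fun mp m1 =>
        match2.foldl (fun mp m2 =>
          if m2.1 == m1.1 && pvOverlaps m1.2 m2.2 then
            mp.insert m1.1 (mp.getD m1.1 [] ++ [(m1, m2)])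
          else mp) mp) mp).keys.Nodup := by
  induction m1s generalizing mp with
  | nil => exact hnd
  | cons h t ih =>
    simp only [List.foldl_cons]
    apply ih
    rw [keys_innerA]
    split_ifs with hcond
    · rw [Bool.and_eq_true, Bool.not_eq_true'] at hcond
      have hmem : h.1 ∉ mp.keys := fun hm =>
        by rw [← PySem.Dict.contains_iff_mem_keys mp h.1, hcond.2] at hm; exact absurd hm (by simp)
      exact List.Nodup.append hnd (List.nodup_singleton h.1)
        (by simpa using hmem)
    · exact hnd

-- a Nodup list has length > 1 iff it holds two distinct elements
lemma one_lt_length_nodup {α : Type} (l : List α) (hnd : l.Nodup) :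
    1 < l.length ↔ ∃ a ∈ l, ∃ b ∈ l, a ≠ b := by
  match l with
  | [] => simp
  | [x] => simp
  | a :: b :: t =>
    simp only [List.length_cons]
    constructor
    · intro _
      refine ⟨a, by simp, b, by simp, ?_⟩
      simp only [List.nodup_cons, List.mem_cons] at hnd
      exact fun h => hnd.1 (Or.inl h)
    · intro _; omega

lemma identicalMatches_eq_spec (match1 match2 : List (String × Int × Int)) :
    identicalMatches match1 match2 = pvTwoHits match1 match2 := by
  unfold identicalMatches
  rw [Bool.eq_iff_iff, decide_eq_true_iff, pvTwoHits_iff,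
    one_lt_length_nodup _ (nodup_keys_outerA match2 match1 _ (by simp [PySem.Dict.keys_empty]))]
  constructor
  · rintro ⟨a, ha, b, hb, hab⟩
    rw [mem_keys_outerA] at ha hb
    simp only [PySem.Dict.keys_empty, List.not_mem_nil, false_or] at ha hb
    obtain ⟨m, hm, hmk, hmh⟩ := ha
    obtain ⟨m', hm', hmk', hmh'⟩ := hb
    exact ⟨m, hm, m', hm', hmh, hmh', by rw [hmk, hmk']; exact hab⟩
  · rintro ⟨m, hm, m', hm', hmh, hmh', hne⟩
    refine ⟨m.1, ?_, m'.1, ?_, hne⟩ <;> rw [mem_keys_outerA]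
    · exact Or.inr ⟨m, hm, rfl, hmh⟩
    · exact Or.inr ⟨m', hm', rfl, hmh'⟩

-- B's loop with a recorded first docid: true iff some later hit has another docid
lemma pvLoop_some (idx : PySem.Dict String (List (Int × Int)))
    (ms : List (String × Int × Int)) (f : String) :
    pvLoop idx ms (some f) = ms.any (fun m => pvHit idx m && m.1 != f) := by
  induction ms with
  | nil => simp [pvLoop]
  | cons h t ih =>
    simp only [pvLoop, List.any_cons]
    by_cases hh : pvHit idx h = true
    · by_cases he : (h.1 == f) = true
      · have : (h.1 != f) = false := by simp [bne]; exact eq_of_beq he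
        simp [hh, he, this, ih]
      · have : (h.1 != f) = true := by simpa [bne] using he
        simp [hh, he, this]
    · simp [hh, ih]

lemma pvLoop_none (idx : PySem.Dict String (List (Int × Int)))
    (ms : List (String × Int × Int)) :
    (pvLoop idx ms none = true) ↔
      ∃ m ∈ ms, ∃ m' ∈ ms, pvHit idx m = true ∧ pvHit idx m' = true ∧ m.1 ≠ m'.1 := by
  induction ms with
  | nil => simp [pvLoop]
  | cons h t ih =>
    simp only [pvLoop]
    by_cases hh : pvHit idx h = true
    · rw [if_pos hh, pvLoop_some]
      simp only [List.any_eq_true, Bool.and_eq_true, bne_iff_ne]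
      constructor
      · rintro ⟨m, hm, hmh, hne⟩
        exact ⟨h, List.mem_cons_self .., m, List.mem_cons_of_mem _ hm, hh, hmh,
          fun h' => hne h'.symm⟩
      · rintro ⟨m, hm, m', hm', hmh, hmh', hne⟩
        have pick : ∀ x, x ∈ h :: t → pvHit idx x = true → x.1 ≠ h.1 →
            ∃ y, y ∈ t ∧ pvHit idx y = true ∧ y.1 ≠ h.1 := by
          intro x hx hhx hxne
          rcases List.mem_cons.mp hx with heq | hxt
          · exact absurd (congrArg Prod.fst heq) hxne
          · exact ⟨x, hxt, hhx, hxne⟩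
        by_cases hmh1 : m.1 = h.1
        · exact pick m' hm' hmh' (fun h' => hne (hmh1.trans h'.symm))
        · exact pick m hm hmh hmh1
    · rw [if_neg hh, ih]
      constructor
      · rintro ⟨m, hm, m', hm', rest⟩
        exact ⟨m, List.mem_cons_of_mem _ hm, ⟨m', List.mem_cons_of_mem _ hm', rest⟩⟩
      · rintro ⟨m, hm, m', hm', hmh, hmh', hne⟩
        rcases List.mem_cons.mp hm with rfl | hm
        · exact absurd hmh hh
        · rcases List.mem_cons.mp hm' with rfl | hm'
          · exact absurd hmh' hh
          · exact ⟨m, hm, m', hm', hmh, hmh', hne⟩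

lemma alt_eq_spec (match1 match2 : List (String × Int × Int)) :
    identicalMatches_alt match1 match2 = pvTwoHits match1 match2 := by
  unfold identicalMatches_alt
  rw [Bool.eq_iff_iff, pvLoop_none, pvTwoHits_iff]
  simp only [pvHit_index]

-- ===== VERDICT (by name: the statement is the Claim_ definition above) =====
theorem identicalMatches_spec : Claim_equal_identicalMatches := by
  intro match1 match2 _
  unfold Spec_identicalMatches
  rw [identicalMatches_eq_spec, alt_eq_spec]
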